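-- pv_equiv track=rewrite | github.com/Isoza05/Onboarding | venv/agents/error_classification/tools.py | _generate_cause_recommendations
-- ===== SOURCE A (Python) =====
-- from typing import Dict, Any, List, Optional
--
-- def _generate_cause_recommendations(primary_cause: str,
--                                   contributing_factors: List[str]) -> List[str]:
--     """Generar recomendaciones basadas en causa raíz"""
--     recommendations = []
--
--     # Recomendaciones basadas en causa principal
--     if "timeout" in primary_cause.lower():
--         recommendations.extend([
--             "Increase timeout configuration for affected agents",
--             "Optimize processing algorithms to reduce execution time",
--             "Implement asynchronous processing for long-running tasks"
--         ])
--
--     elif "agent failure" in primary_cause.lower():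
--         recommendations.extend([
--             "Implement enhanced error handling in affected agent",
--             "Add input validation to prevent invalid data processing",
--             "Set up automated agent restart procedures"
--         ])
--
--     elif "sla breach" in primary_cause.lower():
--         recommendations.extend([
--             "Review and adjust SLA thresholds based on historical performance",
--             "Implement priority queuing for high-priority employees",
--             "Optimize resource allocation during peak hours"
--         ])
--
--     elif "quality failure" in primary_cause.lower():
--         recommendations.extend([
--             "Review and adjust quality gate thresholds",
--             "Implement additional data validation steps",
--             "Provide training on data quality requirements"
--         ])
--
--     # Recomendaciones basadas en factores contribuyentes
--     for factor in contributing_factors: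
--         if "system load" in factor.lower():
--             recommendations.append("Implement load balancing and resource scaling")
--         elif "business hours" in factor.lower():
--             recommendations.append("Consider processing distribution across time zones")
--         elif "configuration" in factor.lower():
--             recommendations.append("Conduct comprehensive configuration review")
--
--     return list(set(recommendations))  # Remove duplicates
-- ===== SOURCE B (Python) =====
-- from typing import List, Optional
--
-- _CAUSE_TABLE = [
--     ("timeout", [
--         "Increase timeout configuration for affected agents",
--         "Optimize processing algorithms to reduce execution time",
--         "Implement asynchronous processing for long-running tasks",
--     ]),
--     ("agent failure", [
--         "Implement enhanced error handling in affected agent",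
--         "Add input validation to prevent invalid data processing",
--         "Set up automated agent restart procedures",
--     ]),
--     ("sla breach", [
--         "Review and adjust SLA thresholds based on historical performance",
--         "Implement priority queuing for high-priority employees",
--         "Optimize resource allocation during peak hours",
--     ]),
--     ("quality failure", [
--         "Review and adjust quality gate thresholds",
--         "Implement additional data validation steps",
--         "Provide training on data quality requirements",
--     ]),
-- ]
--
-- _FACTOR_KEYS = ["system load", "business hours", "configuration"]
-- _FACTOR_RECS = [
--     "Implement load balancing and resource scaling",
--     "Consider processing distribution across time zones",
--     "Conduct comprehensive configuration review",
-- ]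
--
--
-- def _first_factor_key(text: str) -> Optional[int]:
--     # exhaustive match, then pick the minimal (= first) matching keyword index
--     hits = [j for j, k in enumerate(_FACTOR_KEYS) if k in text]
--     return min(hits) if hits else None
--
--
-- def _generate_cause_recommendations(primary_cause: str,
--                                     contributing_factors: List[str]) -> List[str]:
--     pc = primary_cause.lower()
--     cause_hits = [recs for key, recs in _CAUSE_TABLE if key in pc]
--     cause_part = cause_hits[0] if cause_hits else []
--     idxs = [j for j in (_first_factor_key(f.lower()) for f in contributing_factors)
--             if j is not None]
--     return list(set(cause_part + [_FACTOR_RECS[j] for j in idxs]))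
-- ===== Notes on version B (the rewrite author's own statement) =====
-- stated objective: alternative
-- what changed: Replaced A's short-circuit if/elif cascades and accumulator loop with staged passes in index space: exhaustive keyword matching followed by min-index selection picks the cause block and each factor's keyword index, and a comprehension pipeline (map to optional indices, filter Nones, map indices to recommendation texts) replaces the append loop, with list(set(...)) kept for dedup.
import Mathlib
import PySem

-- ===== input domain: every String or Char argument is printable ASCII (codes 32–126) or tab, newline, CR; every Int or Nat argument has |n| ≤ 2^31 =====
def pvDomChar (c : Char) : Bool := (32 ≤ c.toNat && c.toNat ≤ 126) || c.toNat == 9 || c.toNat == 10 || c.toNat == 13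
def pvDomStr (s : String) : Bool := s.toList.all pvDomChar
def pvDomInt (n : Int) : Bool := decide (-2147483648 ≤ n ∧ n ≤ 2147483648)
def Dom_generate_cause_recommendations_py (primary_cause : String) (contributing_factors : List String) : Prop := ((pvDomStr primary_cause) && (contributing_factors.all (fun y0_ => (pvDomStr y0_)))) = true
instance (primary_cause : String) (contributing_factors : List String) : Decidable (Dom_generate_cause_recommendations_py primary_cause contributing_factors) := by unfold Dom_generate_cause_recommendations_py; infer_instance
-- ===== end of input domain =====

-- B replaces A's if/elif cascades by staged passes in index space: exhaustive keyword matching with min-index selection (no short-circuit cascade), then a comprehension pipeline mapping factor indices to recommendations; return value only.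


-- ===== PORT A =====
def generate_cause_recommendations_py (primary_cause : String) (contributing_factors : List String) : List String :=
  let recommendations : List String :=
    if PySem.Str.isIn "timeout" (PySem.Str.lower primary_cause) then
      [ "Increase timeout configuration for affected agents",
        "Optimize processing algorithms to reduce execution time",
        "Implement asynchronous processing for long-running tasks" ]
    else if PySem.Str.isIn "agent failure" (PySem.Str.lower primary_cause) then
      [ "Implement enhanced error handling in affected agent",
        "Add input validation to prevent invalid data processing",
        "Set up automated agent restart procedures" ]
    else if PySem.Str.isIn "sla breach" (PySem.Str.lower primary_cause) then
      [ "Review and adjust SLA thresholds based on historical performance",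
        "Implement priority queuing for high-priority employees",
        "Optimize resource allocation during peak hours" ]
    else if PySem.Str.isIn "quality failure" (PySem.Str.lower primary_cause) then
      [ "Review and adjust quality gate thresholds",
        "Implement additional data validation steps",
        "Provide training on data quality requirements" ]
    else []
  let recommendations := contributing_factors.foldl (fun acc factor =>
    if PySem.Str.isIn "system load" (PySem.Str.lower factor) then
      acc ++ ["Implement load balancing and resource scaling"]
    else if PySem.Str.isIn "business hours" (PySem.Str.lower factor) then
      acc ++ ["Consider processing distribution across time zones"]
    else if PySem.Str.isIn "configuration" (PySem.Str.lower factor) then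
      acc ++ ["Conduct comprehensive configuration review"]
    else acc) recommendations
  PySem.Set.ofList recommendations

-- ===== PORT B =====
def pvCauseTable : List (String × List String) :=
  [ ("timeout",
      [ "Increase timeout configuration for affected agents",
        "Optimize processing algorithms to reduce execution time",
        "Implement asynchronous processing for long-running tasks" ]),
    ("agent failure",
      [ "Implement enhanced error handling in affected agent",
        "Add input validation to prevent invalid data processing",
        "Set up automated agent restart procedures" ]),
    ("sla breach",
      [ "Review and adjust SLA thresholds based on historical performance",
        "Implement priority queuing for high-priority employees",
        "Optimize resource allocation during peak hours" ]),
    ("quality failure",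
      [ "Review and adjust quality gate thresholds",
        "Implement additional data validation steps",
        "Provide training on data quality requirements" ]) ]

def pvFactorKeys : List String := ["system load", "business hours", "configuration"]

def pvFactorRecs : List String :=
  [ "Implement load balancing and resource scaling",
    "Consider processing distribution across time zones",
    "Conduct comprehensive configuration review" ]

-- _first_factor_key: exhaustive match over all keywords, then the minimal matching index
def pvFirstFactorKey (text : String) : Option Int :=
  let hits := ((PySem.List.enumerate pvFactorKeys 0).filter
      (fun jk => PySem.Str.isIn jk.2 text)).map Prod.fst
  if hits = [] then none else PySem.List.min? hits (fun x => x)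

def generate_cause_recommendations_py_alt (primary_cause : String) (contributing_factors : List String) : List String :=
  let pc := PySem.Str.lower primary_cause
  let causeHits := (pvCauseTable.filter (fun kr => PySem.Str.isIn kr.1 pc)).map Prod.snd
  let causePart := match causeHits with
    | [] => []
    | r :: _ => r
  let idxs := (contributing_factors.map (fun f => pvFirstFactorKey (PySem.Str.lower f))).filterMap id
  -- _FACTOR_RECS[j]: j always in range (it comes from enumerate over pvFactorKeys)
  PySem.Set.ofList (causePart ++ idxs.map (fun j => PySem.List.pyGetD pvFactorRecs j ""))

-- ===== PRECONDITION & SPEC =====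
def Spec_generate_cause_recommendations_py (primary_cause : String) (contributing_factors : List String) (out : List String) : Prop := out = generate_cause_recommendations_py_alt primary_cause contributing_factors
instance (primary_cause : String) (contributing_factors : List String) (out : List String) : Decidable (Spec_generate_cause_recommendations_py primary_cause contributing_factors out) := by unfold Spec_generate_cause_recommendations_py; infer_instance

-- ===== CLAIM (what is proved, stated in full; the proofs are below) =====
def Claim_equal_generate_cause_recommendations_py : Prop := ∀ (primary_cause : String) (contributing_factors : List String), Dom_generate_cause_recommendations_py primary_cause contributing_factors → Spec_generate_cause_recommendations_py primary_cause contributing_factors (generate_cause_recommendations_py primary_cause contributing_factors)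

-- ===== LEMMAS AND PROOFS =====

-- B's exhaustive cause-table filter + head computes exactly A's if/elif cascade
theorem pvCausePart_eq (pc : String) :
    (match (pvCauseTable.filter (fun kr => PySem.Str.isIn kr.1 pc)).map Prod.snd with
      | [] => ([] : List String)
      | r :: _ => r) =
      (if PySem.Str.isIn "timeout" pc then
        [ "Increase timeout configuration for affected agents",
          "Optimize processing algorithms to reduce execution time",
          "Implement asynchronous processing for long-running tasks" ]
      else if PySem.Str.isIn "agent failure" pc then
        [ "Implement enhanced error handling in affected agent",
          "Add input validation to prevent invalid data processing",
          "Set up automated agent restart procedures" ]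
      else if PySem.Str.isIn "sla breach" pc then
        [ "Review and adjust SLA thresholds based on historical performance",
          "Implement priority queuing for high-priority employees",
          "Optimize resource allocation during peak hours" ]
      else if PySem.Str.isIn "quality failure" pc then
        [ "Review and adjust quality gate thresholds",
          "Implement additional data validation steps",
          "Provide training on data quality requirements" ]
      else []) := by
  unfold pvCauseTable
  cases h0 : PySem.Str.isIn "timeout" pc <;>
    cases h1 : PySem.Str.isIn "agent failure" pc <;>
      cases h2 : PySem.Str.isIn "sla breach" pc <;>
        cases h3 : PySem.Str.isIn "quality failure" pc <;>
          simp only [List.filter_cons, List.filter_nil, h0, h1, h2, h3] <;> rfl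

-- B's per-factor index (mapped through the recs table) computes exactly A's elif body
theorem pvFactorStep_eq (f : String) :
    ((pvFirstFactorKey f).map (fun j => PySem.List.pyGetD pvFactorRecs j "")).toList =
      (if PySem.Str.isIn "system load" f then
        ["Implement load balancing and resource scaling"]
      else if PySem.Str.isIn "business hours" f then
        ["Consider processing distribution across time zones"]
      else if PySem.Str.isIn "configuration" f then
        ["Conduct comprehensive configuration review"]
      else []) := by
  unfold pvFirstFactorKey pvFactorKeys pvFactorRecs
  cases h0 : PySem.Str.isIn "system load" f <;>
    cases h1 : PySem.Str.isIn "business hours" f <;>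
      cases h2 : PySem.Str.isIn "configuration" f <;>
        simp only [PySem.List.enumerate_cons, PySem.List.enumerate_nil, List.filter_cons,
          List.filter_nil, h0, h1, h2] <;>
        simp [PySem.List.min?, PySem.List.pyGetD]

-- flatMap of an Option-producing step = filterMap then map
theorem flatMap_toList_eq (l : List String) (h : String → Option Int) (g : Int → String) :
    l.flatMap (fun f => ((h f).map g).toList) = ((l.map h).filterMap id).map g := by
  induction l with
  | nil => rfl
  | cons x t ih =>
    cases hx : h x <;> simp [List.flatMap_cons, hx, ih]

-- ===== VERDICT (by name: the statement is the Claim_ definition above) =====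
theorem generate_cause_recommendations_py_spec : Claim_equal_generate_cause_recommendations_py := by
  intro primary_cause contributing_factors _
  unfold Spec_generate_cause_recommendations_py
  unfold generate_cause_recommendations_py generate_cause_recommendations_py_alt
  have hcause := pvCausePart_eq (PySem.Str.lower primary_cause)
  have hstep : (fun (acc : List String) (factor : String) =>
      if PySem.Str.isIn "system load" (PySem.Str.lower factor) then
        acc ++ ["Implement load balancing and resource scaling"]
      else if PySem.Str.isIn "business hours" (PySem.Str.lower factor) then
        acc ++ ["Consider processing distribution across time zones"]
      else if PySem.Str.isIn "configuration" (PySem.Str.lower factor) then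
        acc ++ ["Conduct comprehensive configuration review"]
      else acc) =
      (fun (acc : List String) (factor : String) =>
        acc ++ ((pvFirstFactorKey (PySem.Str.lower factor)).map
          (fun j => PySem.List.pyGetD pvFactorRecs j "")).toList) := by
    funext acc factor
    rw [pvFactorStep_eq (PySem.Str.lower factor)]
    split_ifs <;> simp
  simp only [← hcause, hstep, PySem.List.foldl_append_eq_flatMap,
    flatMap_toList_eq contributing_factors (fun f => pvFirstFactorKey (PySem.Str.lower f))
      (fun j => PySem.List.pyGetD pvFactorRecs j "")]
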